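-- pv_equiv track=rewrite | github.com/jinhyungrhee/Problem-Solving | Programmers/고득점Kit/모의고사.py | solution
-- ===== SOURCE A (Python) =====
-- def solution(answers):
--     answer = []
--     one = [1,2,3,4,5] # 5
--     two = [2,1,2,3,2,4,2,5] # 8
--     three = [3,3,1,1,2,2,4,4,5,5] # 10
--     cnt_one, cnt_two, cnt_three = 0, 0, 0
--     for i in range(len(answers)): # 0 1 2 3 4 5 6 7 8 9
--         if one[i % len(one)] == answers[i]:
--             cnt_one += 1
--
--         if two[i % len(two)] == answers[i]:
--             cnt_two += 1
--
--         if three[i % len(three)] == answers[i]: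
--             cnt_three += 1
--
--     max_val = max(cnt_one, cnt_two, cnt_three)
--     if max_val == cnt_one:
--         answer.append(1)
--     if max_val == cnt_two:
--         answer.append(2)
--     if max_val == cnt_three:
--         answer.append(3)
--
--     return answer
-- ===== SOURCE B (Python) =====
-- def solution(answers):
--     # Histogram approach: bucket answers once by (position mod 40, value) --
--     # 40 = lcm of the three pattern lengths -- then each pattern's score is a
--     # fixed 40-term lookup sum, independent of the answers' length.
--     hist = {}
--     for i, a in enumerate(answers):
--         key = (i % 40, a)
--         hist[key] = hist.get(key, 0) + 1
--     patterns = [[1, 2, 3, 4, 5],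
--                 [2, 1, 2, 3, 2, 4, 2, 5],
--                 [3, 3, 1, 1, 2, 2, 4, 4, 5, 5]]
--     scores = [sum(hist.get((r, pat[r % len(pat)]), 0) for r in range(40))
--               for pat in patterns]
--     best = max(scores)
--     return [k + 1 for k, s in enumerate(scores) if s == best]
-- ===== Notes on version B (the rewrite author's own statement) =====
-- stated objective: alternative
-- what changed: Replaces A's per-element triple pattern comparison with a histogram built once over (index mod 40, answer) pairs (40 = lcm of the pattern lengths); each pattern's score then comes from a fixed 40-term lookup sum instead of being tallied while scanning the answers.
import Mathlib
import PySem

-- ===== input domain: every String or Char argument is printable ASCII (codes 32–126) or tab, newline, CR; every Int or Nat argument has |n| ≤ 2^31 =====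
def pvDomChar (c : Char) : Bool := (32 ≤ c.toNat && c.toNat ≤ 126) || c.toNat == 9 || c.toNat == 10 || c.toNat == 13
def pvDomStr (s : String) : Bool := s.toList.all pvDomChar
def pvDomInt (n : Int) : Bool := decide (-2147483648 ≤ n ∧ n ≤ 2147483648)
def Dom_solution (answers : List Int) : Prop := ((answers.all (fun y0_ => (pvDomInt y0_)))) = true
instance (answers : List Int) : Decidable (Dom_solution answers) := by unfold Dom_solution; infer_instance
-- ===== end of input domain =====

-- B replaces A's per-element triple comparison by a histogram over (index mod 40, answer)
-- built once, from which each pattern's score is a fixed 40-term lookup sum (objective: alternative).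

-- ===== PORT A =====
-- literal port of A: one loop over range(len(answers)) carrying three counters,
-- then max of the three and a cascade of appends (indexing via pyGetD: every
-- index used is in range, so the default is never returned)
def solution (answers : List Int) : List Int :=
  let one : List Int := [1, 2, 3, 4, 5]
  let two : List Int := [2, 1, 2, 3, 2, 4, 2, 5]
  let three : List Int := [3, 3, 1, 1, 2, 2, 4, 4, 5, 5]
  let c :=
    (PySem.List.pyRange 0 (answers.length : Int) 1).foldl
      (fun (c : Int × Int × Int) i =>
        let ai := PySem.List.pyGetD answers i 0
        let c1 := if PySem.List.pyGetD one (PySem.Int.mod i (one.length : Int)) 0 == ai then c.1 + 1 else c.1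
        let c2 := if PySem.List.pyGetD two (PySem.Int.mod i (two.length : Int)) 0 == ai then c.2.1 + 1 else c.2.1
        let c3 := if PySem.List.pyGetD three (PySem.Int.mod i (three.length : Int)) 0 == ai then c.2.2 + 1 else c.2.2
        (c1, c2, c3))
      (0, 0, 0)
  let maxVal := max (max c.1 c.2.1) c.2.2
  let answer : List Int := []
  let answer := if maxVal == c.1 then answer ++ [1] else answer
  let answer := if maxVal == c.2.1 then answer ++ [2] else answer
  let answer := if maxVal == c.2.2 then answer ++ [3] else answer
  answer

-- ===== PORT B =====
-- literal port of Source B: the dict 'hist' counts (i % 40, a) pairs over enumerate(answers);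
-- each pattern's score is sum(hist.get((r, pat[r % len(pat)]), 0) for r in range(40));
-- the result filters enumerate(scores) against max(scores)
def solution_alt (answers : List Int) : List Int :=
  let hist : PySem.Dict (Int × Int) Int :=
    (PySem.List.enumerate answers 0).foldl
      (fun d p =>
        d.insert (PySem.Int.mod p.1 40, p.2) (d.getD (PySem.Int.mod p.1 40, p.2) 0 + 1))
      PySem.Dict.empty
  let patterns : List (List Int) :=
    [[1, 2, 3, 4, 5], [2, 1, 2, 3, 2, 4, 2, 5], [3, 3, 1, 1, 2, 2, 4, 4, 5, 5]]
  let scores : List Int := patterns.map (fun pat =>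
    (PySem.List.pyRange 0 40 1).foldl
      (fun acc r =>
        acc + hist.getD (r, PySem.List.pyGetD pat (PySem.Int.mod r (pat.length : Int)) 0) 0)
      0)
  match PySem.List.max? scores (fun x => x) with
  | none => []
  | some best =>
    (PySem.List.enumerate scores 0).filterMap
      (fun p => if p.2 == best then some (p.1 + 1) else none)

-- ===== PRECONDITION & SPEC =====
def Spec_solution (answers : List Int) (out : List Int) : Prop := out = solution_alt answers
instance (answers : List Int) (out : List Int) : Decidable (Spec_solution answers out) := by unfold Spec_solution; infer_instance

-- ===== CLAIM =====
def Claim_equal_solution : Prop := ∀ (answers : List Int), Dom_solution answers → Spec_solution answers (solution answers)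

-- ===== LEMMAS AND PROOFS =====

-- A's three-counter loop is the triple of countP's of its three tests
theorem triple_foldl_countP (l : List Int) (p1 p2 p3 : Int → Bool) (a b c : Int) :
    l.foldl
      (fun (s : Int × Int × Int) i =>
        ((if p1 i then s.1 + 1 else s.1),
         (if p2 i then s.2.1 + 1 else s.2.1),
         (if p3 i then s.2.2 + 1 else s.2.2)))
      (a, b, c)
    = (a + (l.countP p1 : Int), b + (l.countP p2 : Int), c + (l.countP p3 : Int)) := by
  induction l generalizing a b c with
  | nil => simp
  | cons x t ih =>
    simp only [List.foldl_cons, List.countP_cons, ih]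
    split_ifs <;> simp [Prod.ext_iff] <;> omega

-- looking up the insert-counting dict is counting in the key-mapped list
theorem hist_getD (answers : List Int) (key : Int × Int) :
    ((PySem.List.enumerate answers 0).foldl
      (fun (d : PySem.Dict (Int × Int) Int) p =>
        d.insert (PySem.Int.mod p.1 40, p.2) (d.getD (PySem.Int.mod p.1 40, p.2) 0 + 1))
      PySem.Dict.empty).getD key 0
    = (((PySem.List.enumerate answers 0).map (fun p => (PySem.Int.mod p.1 40, p.2))).count key : Int) := by
  have h1 : ((PySem.List.enumerate answers 0).foldl
      (fun (d : PySem.Dict (Int × Int) Int) p =>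
        d.insert (PySem.Int.mod p.1 40, p.2) (d.getD (PySem.Int.mod p.1 40, p.2) 0 + 1))
      PySem.Dict.empty)
      = (((PySem.List.enumerate answers 0).map (fun p => (PySem.Int.mod p.1 40, p.2))).foldl
        (fun (d : PySem.Dict (Int × Int) Int) x => d.insert x (d.getD x 0 + 1)) PySem.Dict.empty) :=
    by rw [List.foldl_map]
  rw [h1, PySem.Dict.getD_foldl_insert_add_one]
  simp [PySem.Dict.getD_empty]

-- sum of one indicator over a Nodup list containing a
theorem sum_map_ite_single (rs : List Int) (a : Int) (c : Int)
    (hnd : rs.Nodup) (ha : a ∈ rs) :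
    (rs.map (fun r => if r = a then c else 0)).sum = c := by
  induction rs with
  | nil => cases ha
  | cons r t ih =>
    simp only [List.nodup_cons] at hnd
    simp only [List.map_cons, List.sum_cons]
    rcases List.mem_cons.mp ha with h | h
    · subst h
      have hz : (t.map (fun x => if x = a then c else 0)) = t.map (fun _ => (0 : Int)) := by
        apply List.map_congr_left
        intro x hx
        simp [show x ≠ a from fun e => hnd.1 (e ▸ hx)]
      simp [hz]
    · have hra : r ≠ a := fun e => hnd.1 (e ▸ h)
      simp [hra, ih hnd.2 h]

-- summing counts of (r, f r) over the distinct first components is one countP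
theorem sum_count_pairs (ml : List (Int × Int)) (f : Int → Int) (rs : List Int)
    (hnd : rs.Nodup) (hmem : ∀ q ∈ ml, q.1 ∈ rs) :
    (rs.map (fun r => (ml.count (r, f r) : Int))).sum
    = (ml.countP (fun q => f q.1 == q.2) : Int) := by
  induction ml with
  | nil => simp
  | cons q t ih =>
    have hq : q.1 ∈ rs := hmem q List.mem_cons_self
    have ht : ∀ p ∈ t, p.1 ∈ rs := fun p hp => hmem p (List.mem_cons_of_mem _ hp)
    simp only [List.count_cons, List.countP_cons]
    push_cast
    have hsplit : (rs.map (fun r => ((t.count (r, f r) : Int) + if q == (r, f r) then 1 else 0))).sum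
        = (rs.map (fun r => (t.count (r, f r) : Int))).sum
          + (rs.map (fun r => if q == (r, f r) then (1:Int) else 0)).sum := by
      rw [← List.sum_map_add]
    rw [hsplit, ih ht]
    congr 1
    by_cases hb : f q.1 = q.2
    · have he : (rs.map (fun r => if q == (r, f r) then (1:Int) else 0))
          = rs.map (fun r => if r = q.1 then (1:Int) else 0) := by
        apply List.map_congr_left
        intro x _
        by_cases hx : x = q.1
        · subst hx; simp [hb]
        · simp only [beq_iff_eq, Prod.ext_iff]
          simp only [if_neg (show ¬(q.1 = x ∧ q.2 = f x) from fun h => hx h.1.symm), if_neg hx]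
      rw [he, sum_map_ite_single rs q.1 1 hnd hq]
      simp [hb]
    · have he : (rs.map (fun r => if q == (r, f r) then (1:Int) else 0))
          = rs.map (fun _ => (0:Int)) := by
        apply List.map_congr_left
        intro x _
        by_cases hx : x = q.1
        · subst hx
          simp only [beq_iff_eq]
          rw [if_neg (show ¬ q = (q.1, f q.1) from fun h => hb (congrArg Prod.snd h).symm)]
        · simp only [beq_iff_eq]
          rw [if_neg (show ¬ q = (x, f x) from fun h => hx (congrArg Prod.fst h).symm)]
      rw [he]
      simp [hb]

-- Python's mod composes along divisibility (positive divisors)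
theorem mod_mod_40 (len : Int) (h0 : 0 < len) (hd : len ∣ 40) (i : Int) :
    PySem.Int.mod (PySem.Int.mod i 40) len = PySem.Int.mod i len := by
  simp only [PySem.Int.mod_eq_emod_of_pos h0,
    PySem.Int.mod_eq_emod_of_pos (show (0:Int) < 40 by norm_num)]
  exact Int.emod_emod_of_dvd i hd

-- one pattern's 40-term histogram sum equals A's per-index count
theorem score_eq (answers pat : List Int) (h0 : 0 < (pat.length : Int))
    (hd : ((pat.length : Int)) ∣ 40) :
    (PySem.List.pyRange 0 40 1).foldl
      (fun acc r =>
        acc + (((PySem.List.enumerate answers 0).foldl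
          (fun (d : PySem.Dict (Int × Int) Int) p =>
            d.insert (PySem.Int.mod p.1 40, p.2) (d.getD (PySem.Int.mod p.1 40, p.2) 0 + 1))
          PySem.Dict.empty).getD (r, PySem.List.pyGetD pat (PySem.Int.mod r (pat.length : Int)) 0) 0))
      0
    = ((PySem.List.pyRange 0 (answers.length : Int) 1).countP
        (fun i => PySem.List.pyGetD pat (PySem.Int.mod i (pat.length : Int)) 0 == PySem.List.pyGetD answers i 0) : Int) := by
  rw [PySem.List.foldl_add]
  simp only [hist_getD, zero_add]
  rw [sum_count_pairs _ (fun r => PySem.List.pyGetD pat (PySem.Int.mod r (pat.length : Int)) 0)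
      (PySem.List.pyRange 0 40 1) (by decide)
      (by
        intro q hq
        obtain ⟨p, -, rfl⟩ := List.mem_map.mp hq
        exact (PySem.List.mem_pyRange_one).mpr
          ⟨PySem.Int.mod_nonneg _ (by norm_num), PySem.Int.mod_lt _ (by norm_num)⟩)]
  simp only [List.countP_map]
  rw [PySem.List.enumerate_eq_map_pyRange answers 0, PySem.List.len_eq]
  simp only [List.countP_map]
  congr 1
  apply List.countP_congr
  intro i _
  simp only [Function.comp_apply]
  rw [mod_mod_40 _ h0 hd]

-- ===== VERDICT =====
set_option maxRecDepth 8192 in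
theorem solution_spec : Claim_equal_solution := by
  intro answers _
  unfold Spec_solution solution solution_alt
  have h := triple_foldl_countP (PySem.List.pyRange 0 (answers.length : Int) 1)
    (fun i => PySem.List.pyGetD [1,2,3,4,5] (PySem.Int.mod i (([1,2,3,4,5] : List Int).length : Int)) 0 == PySem.List.pyGetD answers i 0)
    (fun i => PySem.List.pyGetD [2,1,2,3,2,4,2,5] (PySem.Int.mod i (([2,1,2,3,2,4,2,5] : List Int).length : Int)) 0 == PySem.List.pyGetD answers i 0)
    (fun i => PySem.List.pyGetD [3,3,1,1,2,2,4,4,5,5] (PySem.Int.mod i (([3,3,1,1,2,2,4,4,5,5] : List Int).length : Int)) 0 == PySem.List.pyGetD answers i 0)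
    0 0 0
  simp only [h, zero_add]
  simp only [List.map]
  rw [score_eq answers [1,2,3,4,5] (by norm_num) (by decide),
      score_eq answers [2,1,2,3,2,4,2,5] (by norm_num) (by decide),
      score_eq answers [3,3,1,1,2,2,4,4,5,5] (by norm_num) (by decide)]
  simp only [PySem.List.max?_id_cons, List.foldl_cons, List.foldl_nil]
  simp only [PySem.List.enumerate_cons, PySem.List.enumerate_nil]
  simp only [List.filterMap_cons, List.filterMap_nil]
  simp only [beq_iff_eq]
  split_ifs <;> first | rfl | (exfalso; omega)
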